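-- pv_equiv track=rewrite | github.com/Cieran0/fad-cobol-cpp | src/main.py | extract_cobol_divisions
-- ===== SOURCE A (Python) =====
-- division_types = ['IDENTIFICATION', 'DATA', 'PROCEDURE']
--
-- def extract_cobol_divisions(lst):
--     divisions = {}
--     current_division = None
--     current_section = []
--
--     for item in lst:
--         if item in division_types:
--             division_name = item + ' DIVISION'
--
--             if current_division:
--                 divisions[current_division] = current_section
--
--             if division_name in divisions:
--                 raise Exception(f"Duplicate division: {item}")
--
--             current_division = division_name
--             current_section = [item]
--         else:
--             if current_section:
--                 current_section.append(item)
--             else: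
--                 current_section = [item]
--
--     if current_division:
--         divisions[current_division] = current_section
--
--     return divisions
-- ===== SOURCE B (Python) =====
-- division_types = ['IDENTIFICATION', 'DATA', 'PROCEDURE']
--
-- def extract_cobol_divisions(lst):
--     result = {}
--     # skip everything before the first division marker (A drops those items too)
--     start = next((k for k, x in enumerate(lst) if x in division_types), len(lst))
--     rest = lst[start:]
--     while rest:
--         head, tail = rest[0], rest[1:]
--         n = next((k for k, x in enumerate(tail) if x in division_types), len(tail))
--         name = head + ' DIVISION'
--         if name in result:
--             raise Exception(f"Duplicate division: {head}")
--         result[name] = [head] + tail[:n]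
--         rest = tail[n:]
--     return result
-- ===== Notes on version B (the rewrite author's own statement) =====
-- stated objective: alternative
-- what changed: Replaces A's one-pass state machine (dict + current_division + mutable current_section accumulator) by a marker-to-marker scan: find the first division marker, then repeatedly slice from the current marker to the next one and assign that slice; no current/section state is carried.
import Mathlib
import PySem

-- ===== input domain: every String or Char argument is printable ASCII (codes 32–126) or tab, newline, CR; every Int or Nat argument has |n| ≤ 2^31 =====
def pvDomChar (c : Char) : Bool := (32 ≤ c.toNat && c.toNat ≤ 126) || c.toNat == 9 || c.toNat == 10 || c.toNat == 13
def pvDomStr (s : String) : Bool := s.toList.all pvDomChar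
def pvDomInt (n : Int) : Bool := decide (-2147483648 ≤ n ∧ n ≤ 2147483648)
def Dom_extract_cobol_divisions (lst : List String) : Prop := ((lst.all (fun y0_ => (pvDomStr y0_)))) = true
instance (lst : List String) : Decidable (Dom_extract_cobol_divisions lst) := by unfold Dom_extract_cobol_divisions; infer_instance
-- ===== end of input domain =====

-- B replaces A's one-pass state machine (dict + current division + growing section) by a
-- marker-to-marker slicing scan with no accumulator state; same cost, different decomposition.

def pvDivisionTypes : List String := ["IDENTIFICATION", "DATA", "PROCEDURE"]

-- ===== PORT A =====
-- one iteration of A's for-loop over state (divisions, current_division, current_section)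
def pvStepA (st : PySem.Dict String (List String) × Option String × List String) (item : String) :
    PySem.Dict String (List String) × Option String × List String :=
  if pvDivisionTypes.contains item then
    let divisionName := item ++ " DIVISION"
    let divisions :=
      match st.2.1 with
      | some cd => st.1.insert cd st.2.2
      | none => st.1
    -- Python raises `Exception` here when divisionName is already a key (a duplicate
    -- division marker); those inputs are excluded by Pre_, so the port proceeds.
    (divisions, some divisionName, [item])
  else
    (st.1, st.2.1, if st.2.2.isEmpty then [item] else st.2.2 ++ [item])

-- A's trailing `if current_division: divisions[current_division] = current_section`
def pvFinalA (st : PySem.Dict String (List String) × Option String × List String) :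
    PySem.Dict String (List String) :=
  match st.2.1 with
  | some cd => st.1.insert cd st.2.2
  | none => st.1

def extract_cobol_divisions (lst : List String) : List (String × List String) :=
  (pvFinalA (lst.foldl pvStepA (PySem.Dict.empty, none, []))).items

-- ===== PORT B =====
-- B's while-loop: rest is always headed by a division marker; cut at the next marker.
def pvGoB (rest : List String) (acc : PySem.Dict String (List String)) :
    PySem.Dict String (List String) :=
  match rest with
  | [] => acc
  | head :: tail =>
    let n := (tail.findIdx? (fun x => pvDivisionTypes.contains x)).getD tail.length
    -- Python raises `Exception` here when head + ' DIVISION' is already a key (duplicate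
    -- marker); those inputs are excluded by Pre_, so the port proceeds.
    pvGoB (tail.drop n) (acc.insert (head ++ " DIVISION") (head :: tail.take n))
termination_by rest.length
decreasing_by simp only [List.length_drop, List.length_cons]; omega

def extract_cobol_divisions_alt (lst : List String) : List (String × List String) :=
  let start := (lst.findIdx? (fun x => pvDivisionTypes.contains x)).getD lst.length
  (pvGoB (lst.drop start) PySem.Dict.empty).items

-- ===== PRECONDITION & SPEC =====
-- Pre_ excludes exactly the lists containing the same division marker twice: there the
-- Python A raises `Exception("Duplicate division: …")` (and so does B).
def Pre_extract_cobol_divisions (lst : List String) : Prop :=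
  (lst.filter (fun x => pvDivisionTypes.contains x)).Nodup
instance (lst : List String) : Decidable (Pre_extract_cobol_divisions lst) := by
  unfold Pre_extract_cobol_divisions; infer_instance

def pvWitness_extract_cobol_divisions : List String :=
  ["junk", "IDENTIFICATION", "PROGRAM-ID. X.", "DATA", "01 A PIC 9.", "PROCEDURE", "STOP RUN."]

def Spec_extract_cobol_divisions (lst : List String) (out : List (String × List String)) : Prop := out = extract_cobol_divisions_alt lst
instance (lst : List String) (out : List (String × List String)) : Decidable (Spec_extract_cobol_divisions lst out) := by unfold Spec_extract_cobol_divisions; infer_instance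

-- ===== CLAIM (what is proved, stated in full; the proofs are below) =====
def Claim_equal_extract_cobol_divisions : Prop := ∀ (lst : List String), Dom_extract_cobol_divisions lst → Pre_extract_cobol_divisions lst → Spec_extract_cobol_divisions lst (extract_cobol_divisions lst)

-- ===== LEMMAS AND PROOFS =====

-- cutting a list at the first index satisfying p is takeWhile/dropWhile of ¬p
lemma take_findIdx? {α : Type} (p : α → Bool) (l : List α) :
    l.take ((l.findIdx? p).getD l.length) = l.takeWhile (fun x => !p x) := by
  induction l with
  | nil => rfl
  | cons x xs ih =>
    by_cases h : p x = true <;>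
      simp [List.findIdx?_cons, h, Option.getD_map, ← ih]

lemma drop_findIdx? {α : Type} (p : α → Bool) (l : List α) :
    l.drop ((l.findIdx? p).getD l.length) = l.dropWhile (fun x => !p x) := by
  induction l with
  | nil => rfl
  | cons x xs ih =>
    by_cases h : p x = true <;>
      simp [List.findIdx?_cons, h, Option.getD_map, ← ih]

-- one step of pvGoB on a marker-headed list, with the cut expressed via takeWhile/dropWhile
lemma pvGoB_cons (x : String) (xs : List String) (d : PySem.Dict String (List String)) :
    pvGoB (x :: xs) d
      = pvGoB (xs.dropWhile (fun y => !pvDivisionTypes.contains y))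
          (d.insert (x ++ " DIVISION")
            (x :: xs.takeWhile (fun y => !pvDivisionTypes.contains y))) := by
  rw [pvGoB]
  simp only [take_findIdx?, drop_findIdx?]

-- A's loop from a live division equals B's scan of the remaining marker-headed suffix
lemma foldA_some (xs : List String) :
    ∀ (d : PySem.Dict String (List String)) (name : String) (sec : List String), sec ≠ [] →
    pvFinalA (xs.foldl pvStepA (d, some name, sec))
      = pvGoB (xs.dropWhile (fun y => !pvDivisionTypes.contains y))
          (d.insert name (sec ++ xs.takeWhile (fun y => !pvDivisionTypes.contains y))) := by
  induction xs with
  | nil => intro d name sec _; simp [pvFinalA, pvGoB]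
  | cons x xs ih =>
    intro d name sec hsec
    by_cases hm : x ∈ pvDivisionTypes
    · have hstep : pvStepA (d, some name, sec) x
          = (d.insert name sec, some (x ++ " DIVISION"), [x]) := by
        simp [pvStepA, hm]
      have hd : List.dropWhile (fun y => !pvDivisionTypes.contains y) (x :: xs) = x :: xs := by
        rw [List.dropWhile_cons]; simp [hm]
      have ht : List.takeWhile (fun y => !pvDivisionTypes.contains y) (x :: xs) = [] := by
        rw [List.takeWhile_cons]; simp [hm]
      rw [List.foldl_cons, hstep, ih _ _ _ (by simp), hd, ht, pvGoB_cons]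
      simp
    · have hstep : pvStepA (d, some name, sec) x = (d, some name, sec ++ [x]) := by
        simp [pvStepA, hm, List.isEmpty_iff, hsec]
      rw [List.foldl_cons, hstep, ih _ _ _ (by simp),
          List.dropWhile_cons, List.takeWhile_cons]
      simp [hm, List.append_assoc]

-- A's loop before any division marker: leading items are dropped, state sec is irrelevant
lemma foldA_none (xs : List String) :
    ∀ (d : PySem.Dict String (List String)) (sec : List String),
    pvFinalA (xs.foldl pvStepA (d, none, sec))
      = pvGoB (xs.dropWhile (fun y => !pvDivisionTypes.contains y)) d := by
  induction xs with
  | nil => intro d sec; simp [pvFinalA, pvGoB]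
  | cons x xs ih =>
    intro d sec
    by_cases hm : x ∈ pvDivisionTypes
    · have hstep : pvStepA (d, none, sec) x = (d, some (x ++ " DIVISION"), [x]) := by
        simp [pvStepA, hm]
      have hd : List.dropWhile (fun y => !pvDivisionTypes.contains y) (x :: xs) = x :: xs := by
        rw [List.dropWhile_cons]; simp [hm]
      rw [List.foldl_cons, hstep, foldA_some _ _ _ _ (by simp), hd, pvGoB_cons]
      simp
    · have hstep : pvStepA (d, none, sec) x
          = (d, none, if sec.isEmpty then [x] else sec ++ [x]) := by
        simp [pvStepA, hm]
      rw [List.foldl_cons, hstep, ih, List.dropWhile_cons]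
      simp [hm]

-- ===== VERDICT (by name: the statement is the Claim_ definition above) =====
theorem extract_cobol_divisions_spec : Claim_equal_extract_cobol_divisions := by
  intro lst _ _
  unfold Spec_extract_cobol_divisions
  simp only [extract_cobol_divisions, extract_cobol_divisions_alt, drop_findIdx?, foldA_none]
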